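-- pv_equiv track=rewrite | github.com/briankaplan/tallyups | helpers.py | norm_text_for_match
-- ===== SOURCE A (Python) =====
-- def norm_text_for_match(s: str | None) -> str:
--     """Lowercase alnum-ish representation for fuzzy merchant matching."""
--     if not s:
--         return ""
--     s = s.lower()
--     kept = []
--     for ch in s:
--         if ch.isalnum():
--             kept.append(ch)
--         elif ch.isspace():
--             kept.append(" ")
--     return " ".join("".join(kept).split())
-- ===== SOURCE B (Python) =====
-- def norm_text_for_match(s: str | None) -> str:
--     """Lowercase alnum-ish representation for fuzzy merchant matching."""
--     if not s:
--         return ""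
--     words = [''.join(ch for ch in w if ch.isalnum()) for w in s.lower().split()]
--     return ' '.join(w for w in words if w)
-- ===== Notes on version B (the rewrite author's own statement) =====
-- stated objective: alternative
-- what changed: B tokenizes on whitespace first (s.lower().split()) and then strips non-alphanumeric characters per word, dropping words that become empty, instead of A's filter-all-chars-into-one-buffer-then-split-and-rejoin pass.
import Mathlib
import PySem

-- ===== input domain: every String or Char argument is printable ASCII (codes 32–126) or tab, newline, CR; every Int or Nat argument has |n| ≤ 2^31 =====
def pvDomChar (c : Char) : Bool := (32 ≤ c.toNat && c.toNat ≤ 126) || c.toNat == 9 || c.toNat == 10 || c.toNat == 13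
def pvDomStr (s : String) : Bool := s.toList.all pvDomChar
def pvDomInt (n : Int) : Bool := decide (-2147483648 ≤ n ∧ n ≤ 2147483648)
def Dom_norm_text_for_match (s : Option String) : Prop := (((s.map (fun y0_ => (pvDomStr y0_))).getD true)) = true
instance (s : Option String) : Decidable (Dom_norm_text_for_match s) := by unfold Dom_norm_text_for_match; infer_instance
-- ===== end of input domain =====

-- B tokenizes on whitespace first, then strips non-alphanumerics per word and drops emptied words;
-- A filters every character into one buffer and only then splits and rejoins. Same result, different decomposition.

-- ===== PORT A =====
def norm_text_for_match (s : Option String) : String :=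
  match s with
  | none => ""
  | some s =>
    if s = "" then ""
    else
      let t := PySem.Str.lower s
      let kept := t.toList.foldl (fun kept ch =>
        if PySem.Chars.isalnum ch then kept ++ [ch]
        else if PySem.Chars.isspace ch then kept ++ [' ']
        else kept) ([] : List Char)
      PySem.Str.join " " (PySem.Str.split₀ (String.ofList kept))

-- ===== PORT B =====
def norm_text_for_match_alt (s : Option String) : String :=
  match s with
  | none => ""
  | some s =>
    if s = "" then ""
    else
      let words := (PySem.Str.split₀ (PySem.Str.lower s)).map
        (fun w => String.ofList (w.toList.filter PySem.Chars.isalnum))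
      PySem.Str.join " " (words.filter (fun w => w != ""))

-- ===== PRECONDITION & SPEC =====
def Spec_norm_text_for_match (s : Option String) (out : String) : Prop := out = norm_text_for_match_alt s
instance (s : Option String) (out : String) : Decidable (Spec_norm_text_for_match s out) := by unfold Spec_norm_text_for_match; infer_instance

-- ===== CLAIM (what is proved, stated in full; the proofs are below) =====
def Claim_equal_norm_text_for_match : Prop := ∀ (s : Option String), Dom_norm_text_for_match s → Spec_norm_text_for_match s (norm_text_for_match s)

-- ===== LEMMAS AND PROOFS =====

/-- What A's character loop keeps of one char: the alnum char itself, a space for whitespace, nothing else. -/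
def pvKeep (c : Char) : Option Char :=
  if PySem.Chars.isalnum c then some c
  else if PySem.Chars.isspace c then some ' '
  else none

theorem pv_alnum_not_space (c : Char) (h : PySem.Chars.isalnum c = true) :
    PySem.Chars.isspace c = false := by
  simp only [PySem.Chars.isalnum, PySem.Chars.isalpha, PySem.Chars.isdigit, PySem.Chars.isupper,
    PySem.Chars.islower, PySem.Chars.isspace, Bool.or_eq_true, Bool.and_eq_true,
    decide_eq_true_eq, Char.le_def] at *
  simp only [Bool.or_eq_false_iff, Bool.and_eq_false_iff, decide_eq_false_iff_not, not_le,
    Char.toNat, UInt32.le_iff_toNat_le,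
    show 'A'.val.toNat = 65 from rfl, show 'Z'.val.toNat = 90 from rfl,
    show 'a'.val.toNat = 97 from rfl, show 'z'.val.toNat = 122 from rfl,
    show '0'.val.toNat = 48 from rfl, show '9'.val.toNat = 57 from rfl] at *
  omega

theorem pv_kept_foldl (cs : List Char) (acc : List Char) :
    cs.foldl (fun kept ch =>
        if PySem.Chars.isalnum ch then kept ++ [ch]
        else if PySem.Chars.isspace ch then kept ++ [' ']
        else kept) acc = acc ++ cs.filterMap pvKeep := by
  induction cs generalizing acc with
  | nil => simp
  | cons c cs ih =>
    rw [List.foldl_cons, ih, List.filterMap_cons]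
    unfold pvKeep
    split_ifs <;> simp

theorem pv_go_nil (cur : List Char) (acc : List (List Char)) :
    PySem.Chars.split₀.go [] cur acc =
      if cur.isEmpty then acc.reverse else (cur.reverse :: acc).reverse := by
  simp [PySem.Chars.split₀.go]

theorem pv_go_space {c : Char} (h : PySem.Chars.isspace c = true) (rest cur : List Char)
    (acc : List (List Char)) :
    PySem.Chars.split₀.go (c :: rest) cur acc =
      if cur.isEmpty then PySem.Chars.split₀.go rest [] acc
      else PySem.Chars.split₀.go rest [] (cur.reverse :: acc) := by
  simp [PySem.Chars.split₀.go, h]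

theorem pv_go_nospace {c : Char} (h : PySem.Chars.isspace c = false) (rest cur : List Char)
    (acc : List (List Char)) :
    PySem.Chars.split₀.go (c :: rest) cur acc = PySem.Chars.split₀.go rest (c :: cur) acc := by
  simp [PySem.Chars.split₀.go, h]

/-- Core correspondence between A's split-after-filter and B's filter-after-split. -/
theorem pv_go_key (cs : List Char) : ∀ (cur : List Char) (acc : List (List Char)),
    (∀ c ∈ cur, PySem.Chars.isspace c = false) →
    PySem.Chars.split₀.go (cs.filterMap pvKeep) (cur.filter PySem.Chars.isalnum)
        ((acc.map (fun w => w.filter PySem.Chars.isalnum)).filter (fun w => !w.isEmpty))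
      = ((PySem.Chars.split₀.go cs cur acc).map (fun w => w.filter PySem.Chars.isalnum)).filter
          (fun w => !w.isEmpty) := by
  induction cs with
  | nil =>
    intro cur acc _
    simp only [List.filterMap_nil, pv_go_nil]
    by_cases hf : cur.filter PySem.Chars.isalnum = [] <;> by_cases hc : cur = [] <;>
      simp_all [List.filter_reverse, List.map_reverse, List.isEmpty_iff]
  | cons c cs ih =>
    intro cur acc hcur
    by_cases ha : PySem.Chars.isalnum c
    · have hs := pv_alnum_not_space c ha
      have hfc : List.filterMap pvKeep (c :: cs) = c :: List.filterMap pvKeep cs := by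
        simp [pvKeep, ha]
      rw [hfc, pv_go_nospace hs, pv_go_nospace hs,
        show c :: cur.filter PySem.Chars.isalnum = (c :: cur).filter PySem.Chars.isalnum by
          simp [ha]]
      exact ih (c :: cur) acc (by
        intro x hx
        rw [List.mem_cons] at hx
        rcases hx with rfl | hx
        · exact hs
        · exact hcur _ hx)
    · by_cases hsp : PySem.Chars.isspace c
      · have hfc : List.filterMap pvKeep (c :: cs) = ' ' :: List.filterMap pvKeep cs := by
          simp [pvKeep, ha, hsp]
        rw [hfc, pv_go_space rfl, pv_go_space hsp]
        by_cases hc : cur = []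
        · subst hc
          simp only [List.filter_nil, List.isEmpty_nil, if_true]
          exact ih [] acc (by simp)
        · have key := ih [] (cur.reverse :: acc) (by simp)
          simp only [List.filter_nil, List.map_cons, List.filter_cons, List.filter_reverse,
            List.isEmpty_reverse] at key
          rw [show cur.isEmpty = false from by simp [List.isEmpty_iff, hc]]
          by_cases hf : cur.filter PySem.Chars.isalnum = []
          · rw [show (cur.filter PySem.Chars.isalnum).isEmpty = true from by simp [hf]]
            simp only [if_true, Bool.false_eq_true, if_false]
            simpa [hf] using key
          · rw [show (cur.filter PySem.Chars.isalnum).isEmpty = false from by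
              simp [List.isEmpty_iff, hf]]
            simp only [Bool.false_eq_true, if_false]
            simpa [List.isEmpty_iff, hf] using key
      · have hfc : List.filterMap pvKeep (c :: cs) = List.filterMap pvKeep cs := by
          simp [pvKeep, ha, hsp]
        rw [hfc, pv_go_nospace (by simpa using hsp),
          show cur.filter PySem.Chars.isalnum = (c :: cur).filter PySem.Chars.isalnum by
            simp [ha]]
        exact ih (c :: cur) acc (by
          intro x hx
          rw [List.mem_cons] at hx
          rcases hx with rfl | hx
          · simpa using hsp
          · exact hcur _ hx)

theorem pv_words_eq (cs : List Char) :
    PySem.Chars.split₀ (cs.filterMap pvKeep)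
      = ((PySem.Chars.split₀ cs).map (fun w => w.filter PySem.Chars.isalnum)).filter
          (fun w => !w.isEmpty) := by
  have := pv_go_key cs [] [] (by simp)
  simpa [PySem.Chars.split₀] using this

theorem pv_final (xs : List String) :
    ((xs.map String.toList).map (fun w => w.filter PySem.Chars.isalnum)).filter
        (fun w => !w.isEmpty)
      = ((xs.map (fun w => String.ofList (w.toList.filter PySem.Chars.isalnum))).filter
          (fun w => w != "")).map String.toList := by
  induction xs with
  | nil => rfl
  | cons x xs ih =>
    simp only [List.map_cons, List.filter_cons]
    by_cases h : x.toList.filter PySem.Chars.isalnum = []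
    · have hb : (String.ofList (x.toList.filter PySem.Chars.isalnum) != "") = false := by
        simp [h]
      simp [h, hb]
      rw [← List.map_map]
      exact ih
    · have hne : String.ofList (x.toList.filter PySem.Chars.isalnum) ≠ "" := fun e =>
        h (by simpa using congrArg String.toList e)
      simp [List.isEmpty_iff, h, hne]
      rw [← List.map_map]
      exact ih

-- ===== VERDICT (by name: the statement is the Claim_ definition above) =====
theorem norm_text_for_match_spec : Claim_equal_norm_text_for_match := by
  intro s _
  unfold Spec_norm_text_for_match
  cases s with
  | none => rfl
  | some s =>
    by_cases hs : s = ""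
    · subst hs; rfl
    · simp only [norm_text_for_match, norm_text_for_match_alt, hs, if_false]
      rw [pv_kept_foldl]
      simp only [List.nil_append]
      unfold PySem.Str.join
      refine congrArg String.ofList (congrArg (PySem.Chars.join " ".toList) ?_)
      rw [PySem.Str.split₀_map_toList, String.toList_ofList, pv_words_eq,
        ← PySem.Str.split₀_map_toList]
      exact pv_final _
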